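-- pv_equiv track=rewrite | github.com/rec/blocks | blocks.py | find
-- ===== SOURCE A (Python) =====
-- def find(rotations):
--     results = []
--
--     def add_block(i, blocks, ff, uu, bb, aa):
--         for block in rotations[i]:
--             f, u, _, a, _, b = block
--
--             if not (f in ff or u in uu or b in bb or a in aa):
--                 bl = blocks + [block]
--                 if i >= len(rotations) - 1:
--                     results.append(bl)
--                 else:
--                     add_block(i + 1, bl, ff + f, uu + u, bb + b, aa + a)
--
--     add_block(0, [], '', '', '', '')
--     return results
-- ===== SOURCE B (Python) =====
-- def find(rotations):
--     # Level-by-level (breadth-first) enumeration instead of recursive DFS;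
--     # order of results is the same lexicographic order of choices.
--     partials = [([], '', '', '', '')]
--     for level in rotations:
--         next_partials = []
--         for blocks, ff, uu, bb, aa in partials:
--             for block in level:
--                 f, u, _, a, _, b = block
--                 if not (f in ff or u in uu or b in bb or a in aa):
--                     next_partials.append((blocks + [block], ff + f, uu + u, bb + b, aa + a))
--         partials = next_partials
--     return [p[0] for p in partials]
-- ===== Notes on version B (the rewrite author's own statement) =====
-- stated objective: alternative
-- what changed: Replaces the recursive backtracking DFS (nested closure mutating an outer results list) by an iterative level-by-level breadth-first product: a frontier of partial (blocks, ff, uu, bb, aa) tuples is extended through each rotation level in order, which yields the same lexicographic result order.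
-- outside the precondition, e.g. on find([]): A raises IndexError, B returns [[]]
import Mathlib
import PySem

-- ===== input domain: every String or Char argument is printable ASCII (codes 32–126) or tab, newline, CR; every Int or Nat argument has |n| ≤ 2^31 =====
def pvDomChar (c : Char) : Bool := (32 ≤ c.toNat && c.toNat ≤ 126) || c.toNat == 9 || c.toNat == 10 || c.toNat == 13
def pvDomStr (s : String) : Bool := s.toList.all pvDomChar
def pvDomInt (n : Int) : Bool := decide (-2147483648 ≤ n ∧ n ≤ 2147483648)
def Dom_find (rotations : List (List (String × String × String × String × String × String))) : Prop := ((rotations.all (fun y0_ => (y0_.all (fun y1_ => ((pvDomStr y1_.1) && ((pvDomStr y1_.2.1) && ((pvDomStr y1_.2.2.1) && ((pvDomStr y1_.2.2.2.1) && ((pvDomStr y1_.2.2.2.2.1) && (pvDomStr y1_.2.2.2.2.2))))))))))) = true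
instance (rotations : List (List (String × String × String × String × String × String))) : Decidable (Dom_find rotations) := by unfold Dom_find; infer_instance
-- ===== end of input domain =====

-- B replaces A's recursive backtracking DFS by an iterative level-by-level (breadth-first)
-- extension of partial combinations; same results in the same order (objective: alternative).

-- ===== PORT A =====
-- add_block(i, blocks, ff, uu, bb, aa): the inner recursive closure of A; appends to the shared
-- results list are modelled by returning the list segment produced by a call.
-- rotations[i]: for every call A makes with rotations ≠ [] we have i < len(rotations), so
-- List.getD is exact there (the i = 0 access raises IndexError on rotations = [], excluded by Pre_).
def pvAddBlock (rotations : List (List (String × String × String × String × String × String)))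
    (i : Nat) (blocks : List (String × String × String × String × String × String))
    (ff uu bb aa : String) : List (List (String × String × String × String × String × String)) :=
  (rotations.getD i []).foldl (fun results block =>
    let f := block.1
    let u := block.2.1
    let a := block.2.2.2.1
    let b := block.2.2.2.2.2
    if !(PySem.Str.isIn f ff || PySem.Str.isIn u uu || PySem.Str.isIn b bb || PySem.Str.isIn a aa) then
      let bl := blocks ++ [block]
      if h : rotations.length - 1 ≤ i then
        results ++ [bl]
      else
        results ++ pvAddBlock rotations (i + 1) bl (ff ++ f) (uu ++ u) (bb ++ b) (aa ++ a)
    else results) []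
termination_by rotations.length - i
decreasing_by omega

def find (rotations : List (List (String × String × String × String × String × String))) : List (List (String × String × String × String × String × String)) :=
  pvAddBlock rotations 0 [] "" "" "" ""

-- ===== PORT B =====
-- iterative frontier of partials (blocks, ff, uu, bb, aa), extended level by level
def find_alt (rotations : List (List (String × String × String × String × String × String))) : List (List (String × String × String × String × String × String)) :=
  let partials :=
    rotations.foldl (fun partials level =>
      partials.foldl (fun nextPartials p =>
        level.foldl (fun nextPartials block =>
          let f := block.1
          let u := block.2.1
          let a := block.2.2.2.1
          let b := block.2.2.2.2.2
          if !(PySem.Str.isIn f p.2.1 || PySem.Str.isIn u p.2.2.1 || PySem.Str.isIn b p.2.2.2.1 || PySem.Str.isIn a p.2.2.2.2) then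
            nextPartials ++ [(p.1 ++ [block], p.2.1 ++ f, p.2.2.1 ++ u, p.2.2.2.1 ++ b, p.2.2.2.2 ++ a)]
          else nextPartials) nextPartials) [])
      [(([] : List (String × String × String × String × String × String)), "", "", "", "")]
  partials.map (·.1)

-- ===== PRECONDITION & SPEC =====
-- A indexes rotations[0] unconditionally, so it raises IndexError on rotations = []; Pre_ excludes exactly that input.
def Pre_find (rotations : List (List (String × String × String × String × String × String))) : Prop := rotations ≠ []
instance (rotations : List (List (String × String × String × String × String × String))) : Decidable (Pre_find rotations) := by unfold Pre_find; infer_instance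

def pvWitness_find : (List (List (String × String × String × String × String × String))) :=
  [[("a", "b", "c", "d", "e", "f")]]

def Spec_find (rotations : List (List (String × String × String × String × String × String))) (out : List (List (String × String × String × String × String × String))) : Prop := out = find_alt rotations
instance (rotations : List (List (String × String × String × String × String × String))) (out : List (List (String × String × String × String × String × String))) : Decidable (Spec_find rotations out) := by
  unfold Spec_find
  haveI : DecidableEq (List (String × String × String × String × String × String)) := fun x y => List.hasDecEq x y
  infer_instance

-- ===== CLAIM (what is proved, stated in full; the proofs are below) =====
def Claim_equal_find : Prop := ∀ (rotations : List (List (String × String × String × String × String × String))), Dom_find rotations → Pre_find rotations → Spec_find rotations (find rotations)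

-- ===== LEMMAS AND PROOFS =====

abbrev Blk := (String × String × String × String × String × String)
abbrev Prt := List Blk × String × String × String × String

-- clean DFS on the list of remaining levels; both ports are reduced to it
def pvDfs : List (List Blk) → List Blk → String → String → String → String → List (List Blk)
  | [], _, _, _, _, _ => []
  | level :: rest, blocks, ff, uu, bb, aa =>
    level.foldl (fun results block =>
      let f := block.1
      let u := block.2.1
      let a := block.2.2.2.1
      let b := block.2.2.2.2.2
      if !(PySem.Str.isIn f ff || PySem.Str.isIn u uu || PySem.Str.isIn b bb || PySem.Str.isIn a aa) then
        if rest.isEmpty then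
          results ++ [blocks ++ [block]]
        else
          results ++ pvDfs rest (blocks ++ [block]) (ff ++ f) (uu ++ u) (bb ++ b) (aa ++ a)
      else results) []

theorem pvAddBlock_eq_dfs (rotations : List (List Blk)) :
    ∀ (n i : Nat), rotations.length - i ≤ n → ∀ (blocks : List Blk) (ff uu bb aa : String),
    pvAddBlock rotations i blocks ff uu bb aa = pvDfs (rotations.drop i) blocks ff uu bb aa := by
  intro n
  induction n with
  | zero =>
    intro i hi blocks ff uu bb aa
    have hlen : rotations.length ≤ i := by omega
    rw [pvAddBlock, List.getD_eq_getElem?_getD, List.getElem?_eq_none (by omega), List.drop_eq_nil_of_le hlen]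
    rfl
  | succ n ih =>
    intro i hi blocks ff uu bb aa
    cases hd : rotations.drop i with
    | nil =>
      have hlen : rotations.length ≤ i := by
        by_contra h
        exact absurd hd (by simp [List.drop_eq_nil_iff]; omega)
      rw [pvAddBlock, List.getD_eq_getElem?_getD, List.getElem?_eq_none (by omega)]
      rfl
    | cons level rest =>
      have hilt : i < rotations.length := by
        by_contra h
        rw [List.drop_eq_nil_of_le (by omega)] at hd; exact absurd hd (by simp)
      have hget : rotations.getD i [] = level := by
        rw [List.getD_eq_getElem?_getD, ← List.head?_drop, hd]; rfl
      have hrest : rotations.drop (i + 1) = rest := by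
        rw [← List.tail_drop, hd]; rfl
      rw [pvAddBlock, hget, pvDfs]
      congr 1
      funext results block
      dsimp only
      split
      · by_cases hlast : rotations.length - 1 ≤ i
        · have : rest.isEmpty := by
            rw [← hrest, List.isEmpty_iff, List.drop_eq_nil_iff]; omega
          rw [dif_pos hlast, if_pos this]
        · have hne : rest.isEmpty = false := by
            rw [← hrest, List.isEmpty_eq_false_iff, ← List.length_pos_iff, List.length_drop]; omega
          rw [dif_neg hlast, hne, if_neg (by simp), ← hrest,
            ih (i + 1) (by omega)]
      · rfl

theorem find_eq_dfs (rotations : List (List Blk)) :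
    find rotations = pvDfs rotations [] "" "" "" "" := by
  simpa using pvAddBlock_eq_dfs rotations rotations.length 0 (by omega) [] "" "" "" ""

-- one level of B's frontier extension (the body of find_alt's outer fold, as a named function)
def pvStep (partials : List Prt) (level : List Blk) : List Prt :=
  partials.foldl (fun nextPartials p =>
    level.foldl (fun nextPartials block =>
      let f := block.1
      let u := block.2.1
      let a := block.2.2.2.1
      let b := block.2.2.2.2.2
      if !(PySem.Str.isIn f p.2.1 || PySem.Str.isIn u p.2.2.1 || PySem.Str.isIn b p.2.2.2.1 || PySem.Str.isIn a p.2.2.2.2) then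
        nextPartials ++ [(p.1 ++ [block], p.2.1 ++ f, p.2.2.1 ++ u, p.2.2.2.1 ++ b, p.2.2.2.2 ++ a)]
      else nextPartials) nextPartials) []

def pvOk (ff uu bb aa : String) (block : Blk) : Bool :=
  !(PySem.Str.isIn block.1 ff || PySem.Str.isIn block.2.1 uu || PySem.Str.isIn block.2.2.2.2.2 bb || PySem.Str.isIn block.2.2.2.1 aa)

theorem pvStep_eq (partials : List Prt) (level : List Blk) :
    pvStep partials level = partials.flatMap (fun p =>
      (level.filter (pvOk p.2.1 p.2.2.1 p.2.2.2.1 p.2.2.2.2)).map (fun block =>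
        (p.1 ++ [block], p.2.1 ++ block.1, p.2.2.1 ++ block.2.1, p.2.2.2.1 ++ block.2.2.2.2.2, p.2.2.2.2 ++ block.2.2.2.1))) := by
  unfold pvStep
  have h1 : (fun (nextPartials : List Prt) (p : Prt) =>
      level.foldl (fun nextPartials block =>
        let f := block.1
        let u := block.2.1
        let a := block.2.2.2.1
        let b := block.2.2.2.2.2
        if !(PySem.Str.isIn f p.2.1 || PySem.Str.isIn u p.2.2.1 || PySem.Str.isIn b p.2.2.2.1 || PySem.Str.isIn a p.2.2.2.2) then
          nextPartials ++ [(p.1 ++ [block], p.2.1 ++ f, p.2.2.1 ++ u, p.2.2.2.1 ++ b, p.2.2.2.2 ++ a)]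
        else nextPartials) nextPartials) =
      (fun (nextPartials : List Prt) (p : Prt) => nextPartials ++
        (level.filter (pvOk p.2.1 p.2.2.1 p.2.2.2.1 p.2.2.2.2)).map (fun block =>
          (p.1 ++ [block], p.2.1 ++ block.1, p.2.2.1 ++ block.2.1, p.2.2.2.1 ++ block.2.2.2.2.2, p.2.2.2.2 ++ block.2.2.2.1))) := by
    funext np p
    exact PySem.List.foldl_append_if _ _ _ _
  rw [h1, PySem.List.foldl_append_eq_flatMap, List.nil_append]

theorem pvFlatMap_ite {α β : Type} (l : List α) (p : α → Bool) (g : α → List β) :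
    l.flatMap (fun x => if p x then g x else []) = (l.filter p).flatMap g := by
  induction l with
  | nil => simp
  | cons h t ih => by_cases hp : p h <;> simp [hp, ih]

theorem pvDfs_last (l : List Blk) (blocks : List Blk) (ff uu bb aa : String) :
    pvDfs [l] blocks ff uu bb aa = (l.filter (pvOk ff uu bb aa)).map (fun block => blocks ++ [block]) := by
  rw [pvDfs]
  simp only [List.isEmpty_nil, if_true]
  exact PySem.List.foldl_append_if _ _ _ _

theorem pvDfs_cons (l : List Blk) (rest : List (List Blk)) (hrest : rest ≠ [])
    (blocks : List Blk) (ff uu bb aa : String) :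
    pvDfs (l :: rest) blocks ff uu bb aa = (l.filter (pvOk ff uu bb aa)).flatMap (fun block =>
      pvDfs rest (blocks ++ [block]) (ff ++ block.1) (uu ++ block.2.1) (bb ++ block.2.2.2.2.2) (aa ++ block.2.2.2.1)) := by
  rw [pvDfs]
  have hie : rest.isEmpty = false := by simp [List.isEmpty_eq_false_iff, hrest]
  have h1 : (fun (results : List (List Blk)) (block : Blk) =>
      let f := block.1
      let u := block.2.1
      let a := block.2.2.2.1
      let b := block.2.2.2.2.2
      if !(PySem.Str.isIn f ff || PySem.Str.isIn u uu || PySem.Str.isIn b bb || PySem.Str.isIn a aa) then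
        if rest.isEmpty then
          results ++ [blocks ++ [block]]
        else
          results ++ pvDfs rest (blocks ++ [block]) (ff ++ f) (uu ++ u) (bb ++ b) (aa ++ a)
      else results) =
      (fun results block => results ++
        (if pvOk ff uu bb aa block then
          pvDfs rest (blocks ++ [block]) (ff ++ block.1) (uu ++ block.2.1) (bb ++ block.2.2.2.2.2) (aa ++ block.2.2.2.1)
        else [])) := by
    funext results block
    simp only [hie, Bool.false_eq_true, if_false, pvOk]
    split <;> simp
  rw [h1, PySem.List.foldl_append_eq_flatMap, List.nil_append, pvFlatMap_ite]

theorem pvBfs_eq_dfs : ∀ (levels : List (List Blk)), levels ≠ [] → ∀ (partials : List Prt),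
    (levels.foldl pvStep partials).map (·.1) =
      partials.flatMap (fun p => pvDfs levels p.1 p.2.1 p.2.2.1 p.2.2.2.1 p.2.2.2.2) := by
  intro levels
  induction levels with
  | nil => intro h; exact absurd rfl h
  | cons l rest ih =>
    intro _ partials
    cases hr : rest with
    | nil =>
      simp only [List.foldl_cons, List.foldl_nil, pvStep_eq]
      rw [List.map_flatMap]
      refine List.flatMap_congr fun p _ => ?_
      rw [pvDfs_last, List.map_map]
      rfl
    | cons l2 t =>
      have hne : rest ≠ [] := by rw [hr]; simp
      rw [List.foldl_cons, ← hr, ih hne, pvStep_eq, List.flatMap_assoc]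
      refine List.flatMap_congr fun p _ => ?_
      rw [pvDfs_cons l rest hne, List.flatMap_map]

theorem find_alt_eq_dfs (rotations : List (List Blk)) (h : rotations ≠ []) :
    find_alt rotations = pvDfs rotations [] "" "" "" "" := by
  have hfa : find_alt rotations =
      (rotations.foldl pvStep [(([] : List Blk), "", "", "", "")]).map (·.1) := rfl
  rw [hfa, pvBfs_eq_dfs rotations h]
  simp

-- ===== VERDICT (by name: the statement is the Claim_ definition above) =====
theorem find_spec : Claim_equal_find := by
  intro rotations _ hpre
  show find rotations = find_alt rotations
  rw [find_eq_dfs, find_alt_eq_dfs rotations hpre]
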